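-- pv_equiv track=rewrite | github.com/furkatkasimov/lamf | lamf/policies.py | _popularity_rec
-- ===== SOURCE A (Python) =====
-- from typing import Dict, List, Optional, Set
--
-- def _popularity_rec(
--     pop_rank: List[int],
--     item_to_cat_idx: Dict[int, int],
--     allowed_cat_idxs: List[int],
--     seen: Set[int],
--     k: int,
-- ) -> List[int]:
--     """Pick top-k unseen items, preferring those in allowed categories."""
--     recs: List[int] = []
--     # First pass: in-category items
--     for item_id in pop_rank:
--         if item_id in seen:
--             continue
--         cat = item_to_cat_idx.get(item_id)
--         if cat is not None and cat in allowed_cat_idxs: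
--             recs.append(item_id)
--         if len(recs) >= k:
--             break
--     # Second pass: fall back to any popular item
--     if len(recs) < k:
--         for item_id in pop_rank:
--             if item_id in seen or item_id in recs:
--                 continue
--             recs.append(item_id)
--             if len(recs) >= k:
--                 break
--     return recs[:k]
-- ===== SOURCE B (Python) =====
-- from typing import Dict, List, Set
--
--
-- def _popularity_rec(
--     pop_rank: List[int],
--     item_to_cat_idx: Dict[int, int],
--     allowed_cat_idxs: List[int],
--     seen: Set[int],
--     k: int,
-- ) -> List[int]:
--     """Pick top-k unseen items, preferring those in allowed categories.
--
--     Single pass: partition the unseen items into in-category hits and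
--     deduplicated fallbacks, then concatenate and cut to k.
--     """
--     if k <= 0:
--         return []
--     in_cat: List[int] = []
--     others: List[int] = []
--     for item_id in pop_rank:
--         if item_id in seen:
--             continue
--         cat = item_to_cat_idx.get(item_id)
--         if cat is not None and cat in allowed_cat_idxs:
--             in_cat.append(item_id)
--         elif item_id not in others:
--             others.append(item_id)
--     return (in_cat + others)[:k]
-- ===== Notes on version B (the rewrite author's own statement) =====
-- stated objective: simpler
-- what changed: Replaces A's two sequential scans with early-break logic by one partition pass building in-category hits and deduplicated fallbacks, then concatenating and slicing to k.
import Mathlib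
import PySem

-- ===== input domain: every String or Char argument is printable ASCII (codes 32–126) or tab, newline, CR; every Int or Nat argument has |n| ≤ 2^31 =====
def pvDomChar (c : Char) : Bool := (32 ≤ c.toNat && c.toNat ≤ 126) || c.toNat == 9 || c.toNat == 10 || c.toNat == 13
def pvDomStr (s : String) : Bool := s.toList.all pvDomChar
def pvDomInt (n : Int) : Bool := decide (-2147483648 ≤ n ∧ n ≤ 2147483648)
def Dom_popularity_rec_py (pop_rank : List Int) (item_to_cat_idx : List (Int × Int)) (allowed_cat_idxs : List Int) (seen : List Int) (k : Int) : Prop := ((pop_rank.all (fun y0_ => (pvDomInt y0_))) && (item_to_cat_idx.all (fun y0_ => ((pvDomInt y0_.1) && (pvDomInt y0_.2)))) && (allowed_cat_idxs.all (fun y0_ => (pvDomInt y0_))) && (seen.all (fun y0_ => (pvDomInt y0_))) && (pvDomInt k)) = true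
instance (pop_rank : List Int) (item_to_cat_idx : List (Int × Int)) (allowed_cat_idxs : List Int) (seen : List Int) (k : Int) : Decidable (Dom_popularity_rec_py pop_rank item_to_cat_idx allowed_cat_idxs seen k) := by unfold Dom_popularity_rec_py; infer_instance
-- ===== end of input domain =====

-- B replaces A's two sequential scans (with early break) by a single partition pass
-- (in-category hits + deduplicated fallbacks) followed by concatenate-and-slice; same results.

-- ===== PORT A =====
-- first loop of A: append unseen in-category items, break once len(recs) >= k
def pvA_first (item_to_cat_idx : List (Int × Int)) (allowed_cat_idxs : List Int)
    (seen : List Int) (k : Int) : List Int → List Int → List Int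
  | [], recs => recs
  | item :: rest, recs =>
    if item ∈ seen then pvA_first item_to_cat_idx allowed_cat_idxs seen k rest recs
    else
      let recs' :=
        match (PySem.Dict.mk item_to_cat_idx).get? item with
        | some cat => if cat ∈ allowed_cat_idxs then recs ++ [item] else recs
        | none => recs
      if k ≤ (recs'.length : Int) then recs'
      else pvA_first item_to_cat_idx allowed_cat_idxs seen k rest recs'

-- second loop of A: append any unseen item not already in recs, break once len(recs) >= k
def pvA_second (seen : List Int) (k : Int) : List Int → List Int → List Int
  | [], recs => recs
  | item :: rest, recs =>
    if item ∈ seen ∨ item ∈ recs then pvA_second seen k rest recs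
    else
      let recs' := recs ++ [item]
      if k ≤ (recs'.length : Int) then recs'
      else pvA_second seen k rest recs'

def popularity_rec_py (pop_rank : List Int) (item_to_cat_idx : List (Int × Int)) (allowed_cat_idxs : List Int) (seen : List Int) (k : Int) : List Int :=
  let recs := pvA_first item_to_cat_idx allowed_cat_idxs seen k pop_rank []
  let recs := if (recs.length : Int) < k then pvA_second seen k pop_rank recs else recs
  PySem.List.slice recs none (some k)

-- ===== PORT B =====
-- B's single pass: build (in_cat, others); others is deduplicated
def pvB_loop (item_to_cat_idx : List (Int × Int)) (allowed_cat_idxs : List Int)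
    (seen : List Int) : List Int → List Int → List Int → List Int × List Int
  | [], inc, oth => (inc, oth)
  | item :: rest, inc, oth =>
    if item ∈ seen then pvB_loop item_to_cat_idx allowed_cat_idxs seen rest inc oth
    else
      match (PySem.Dict.mk item_to_cat_idx).get? item with
      | some cat =>
        if cat ∈ allowed_cat_idxs then
          pvB_loop item_to_cat_idx allowed_cat_idxs seen rest (inc ++ [item]) oth
        else if item ∈ oth then pvB_loop item_to_cat_idx allowed_cat_idxs seen rest inc oth
        else pvB_loop item_to_cat_idx allowed_cat_idxs seen rest inc (oth ++ [item])
      | none =>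
        if item ∈ oth then pvB_loop item_to_cat_idx allowed_cat_idxs seen rest inc oth
        else pvB_loop item_to_cat_idx allowed_cat_idxs seen rest inc (oth ++ [item])

def popularity_rec_py_alt (pop_rank : List Int) (item_to_cat_idx : List (Int × Int)) (allowed_cat_idxs : List Int) (seen : List Int) (k : Int) : List Int :=
  if k ≤ 0 then []
  else
    let p := pvB_loop item_to_cat_idx allowed_cat_idxs seen pop_rank [] []
    PySem.List.slice (p.1 ++ p.2) none (some k)

-- ===== PRECONDITION & SPEC =====
def Spec_popularity_rec_py (pop_rank : List Int) (item_to_cat_idx : List (Int × Int)) (allowed_cat_idxs : List Int) (seen : List Int) (k : Int) (out : List Int) : Prop := out = popularity_rec_py_alt pop_rank item_to_cat_idx allowed_cat_idxs seen k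
instance (pop_rank : List Int) (item_to_cat_idx : List (Int × Int)) (allowed_cat_idxs : List Int) (seen : List Int) (k : Int) (out : List Int) : Decidable (Spec_popularity_rec_py pop_rank item_to_cat_idx allowed_cat_idxs seen k out) := by unfold Spec_popularity_rec_py; infer_instance

-- ===== CLAIM (what is proved, stated in full; the proofs are below) =====
def Claim_equal_popularity_rec_py : Prop := ∀ (pop_rank : List Int) (item_to_cat_idx : List (Int × Int)) (allowed_cat_idxs : List Int) (seen : List Int) (k : Int), Dom_popularity_rec_py pop_rank item_to_cat_idx allowed_cat_idxs seen k → Spec_popularity_rec_py pop_rank item_to_cat_idx allowed_cat_idxs seen k (popularity_rec_py pop_rank item_to_cat_idx allowed_cat_idxs seen k)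


-- ===== LEMMAS AND PROOFS =====

-- proof-side helpers
def pvOk (d : List (Int × Int)) (al : List Int) (x : Int) : Bool :=
  match (PySem.Dict.mk d).get? x with
  | some c => decide (c ∈ al)
  | none => false

def pvGood (d : List (Int × Int)) (al seen : List Int) (x : Int) : Bool :=
  !decide (x ∈ seen) && pvOk d al x

def pvF (d : List (Int × Int)) (al seen l : List Int) : List Int :=
  l.filter (pvGood d al seen)

-- A's second loop without the break
def pvScan (seen : List Int) : List Int → List Int → List Int
  | [], recs => recs
  | item :: rest, recs =>
    if item ∈ seen ∨ item ∈ recs then pvScan seen rest recs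
    else pvScan seen rest (recs ++ [item])

theorem pvF_mem_ok {d : List (Int × Int)} {al seen m : List Int} {x : Int}
    (h : pvOk d al x = false) : x ∉ pvF d al seen m := by
  intro hx
  have := (List.mem_filter.mp hx).2
  simp [pvGood, h] at this

theorem pvA_first_eq (d : List (Int × Int)) (al seen : List Int) (k : Int) :
    ∀ (l recs : List Int), (recs.length : Int) < k →
      pvA_first d al seen k l recs = (recs ++ pvF d al seen l).take k.toNat := by
  intro l
  induction l with
  | nil =>
    intro recs h
    have : recs.length ≤ k.toNat := by omega
    simp [pvA_first, pvF, List.take_of_length_le this]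
  | cons item rest ih =>
    intro recs h
    by_cases hseen : item ∈ seen
    · have hg : pvGood d al seen item = false := by simp [pvGood, hseen]
      simp only [pvA_first, if_pos hseen]
      rw [ih recs h]
      simp [pvF, hg]
    · rcases hget : (PySem.Dict.mk d).get? item with _ | c
      · have hg : pvGood d al seen item = false := by simp [pvGood, pvOk, hget]
        simp only [pvA_first, if_neg hseen, hget]
        have hnb : ¬ k ≤ (recs.length : Int) := by omega
        rw [if_neg hnb, ih recs h]
        simp [pvF, hg]
      · by_cases hc : c ∈ al
        · have hg : pvGood d al seen item = true := by simp [pvGood, pvOk, hget, hseen, hc]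
          have hF : pvF d al seen (item :: rest) = item :: pvF d al seen rest := by
            simp [pvF, hg]
          simp only [pvA_first, if_neg hseen, hget, if_pos hc]
          by_cases hb : k ≤ ((recs ++ [item]).length : Int)
          · rw [if_pos hb]
            have hlen : (recs ++ [item]).length = k.toNat := by
              simp at hb ⊢; omega
            rw [hF, show recs ++ item :: pvF d al seen rest
                  = (recs ++ [item]) ++ pvF d al seen rest by simp,
                ← hlen, List.take_left]
          · rw [if_neg hb, ih (recs ++ [item]) (by simp at hb ⊢; omega), hF]
            simp
        · have hg : pvGood d al seen item = false := by simp [pvGood, pvOk, hget, hc]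
          simp only [pvA_first, if_neg hseen, hget, if_neg hc]
          have hnb : ¬ k ≤ (recs.length : Int) := by omega
          rw [if_neg hnb, ih recs h]
          simp [pvF, hg]

theorem pvScan_prefix (seen : List Int) :
    ∀ (l recs : List Int), ∃ s, pvScan seen l recs = recs ++ s := by
  intro l
  induction l with
  | nil => exact fun recs => ⟨[], by simp [pvScan]⟩
  | cons item rest ih =>
    intro recs
    by_cases hc : item ∈ seen ∨ item ∈ recs
    · obtain ⟨s, hs⟩ := ih recs
      exact ⟨s, by simp [pvScan, hc, hs]⟩
    · obtain ⟨s, hs⟩ := ih (recs ++ [item])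
      exact ⟨item :: s, by simp [pvScan, hc, hs]⟩

theorem pvA_second_eq (seen : List Int) (k : Int) :
    ∀ (l recs : List Int), (recs.length : Int) < k →
      pvA_second seen k l recs = (pvScan seen l recs).take k.toNat := by
  intro l
  induction l with
  | nil =>
    intro recs h
    have : recs.length ≤ k.toNat := by omega
    simp [pvA_second, pvScan, List.take_of_length_le this]
  | cons item rest ih =>
    intro recs h
    by_cases hc : item ∈ seen ∨ item ∈ recs
    · simp only [pvA_second, pvScan, if_pos hc]
      exact ih recs h
    · simp only [pvA_second, pvScan, if_neg hc]
      by_cases hb : k ≤ ((recs ++ [item]).length : Int)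
      · rw [if_pos hb]
        obtain ⟨s, hs⟩ := pvScan_prefix seen rest (recs ++ [item])
        have hlen : (recs ++ [item]).length = k.toNat := by simp at hb ⊢; omega
        rw [hs, ← hlen, List.take_left]
      · rw [if_neg hb]
        exact ih (recs ++ [item]) (by simp at hb ⊢; omega)

theorem pvB_fst (d : List (Int × Int)) (al seen : List Int) :
    ∀ (l inc oth : List Int),
      (pvB_loop d al seen l inc oth).1 = inc ++ pvF d al seen l := by
  intro l
  induction l with
  | nil => intro inc oth; simp [pvB_loop, pvF]
  | cons item rest ih =>
    intro inc oth
    by_cases hseen : item ∈ seen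
    · have hg : pvGood d al seen item = false := by simp [pvGood, hseen]
      simp only [pvB_loop, if_pos hseen]
      rw [ih]; simp [pvF, hg]
    · rcases hget : (PySem.Dict.mk d).get? item with _ | c
      · have hg : pvGood d al seen item = false := by simp [pvGood, pvOk, hget]
        simp only [pvB_loop, if_neg hseen, hget]
        by_cases ho : item ∈ oth <;> simp only [if_pos, ho, ite_false] <;>
          · rw [ih]; simp [pvF, hg]
      · by_cases hc : c ∈ al
        · have hg : pvGood d al seen item = true := by simp [pvGood, pvOk, hget, hseen, hc]
          simp only [pvB_loop, if_neg hseen, hget, if_pos hc]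
          rw [ih]; simp [pvF, hg]
        · have hg : pvGood d al seen item = false := by simp [pvGood, pvOk, hget, hc]
          simp only [pvB_loop, if_neg hseen, hget, if_neg hc]
          by_cases ho : item ∈ oth <;> simp only [if_pos, ho, ite_false] <;>
            · rw [ih]; simp [pvF, hg]

theorem pvScan_eq_pvB (d : List (Int × Int)) (al seen : List Int) (I : List Int)
    (hI : ∀ x : Int, pvOk d al x = false → x ∉ I) :
    ∀ (l acc inc : List Int), (∀ x ∈ l, pvGood d al seen x = true → x ∈ I) →
      pvScan seen l (I ++ acc) = I ++ (pvB_loop d al seen l inc acc).2 := by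
  intro l
  induction l with
  | nil => intro acc inc _; simp [pvScan, pvB_loop]
  | cons item rest ih =>
    intro acc inc hmem
    have hrest : ∀ x ∈ rest, pvGood d al seen x = true → x ∈ I :=
      fun x hx => hmem x (List.mem_cons_of_mem _ hx)
    by_cases hseen : item ∈ seen
    · have hc : item ∈ seen ∨ item ∈ I ++ acc := Or.inl hseen
      simp only [pvScan, if_pos hc, pvB_loop, if_pos hseen]
      exact ih acc inc hrest
    · rcases hget : (PySem.Dict.mk d).get? item with _ | c
      · have hok : pvOk d al item = false := by simp [pvOk, hget]
        have hni : item ∉ I := hI item hok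
        simp only [pvB_loop, if_neg hseen, hget]
        by_cases ho : item ∈ acc
        · have hc : item ∈ seen ∨ item ∈ I ++ acc := Or.inr (by simp [ho])
          simp only [pvScan, if_pos hc, ite_true, ho]
          exact ih acc inc hrest
        · have hc : ¬ (item ∈ seen ∨ item ∈ I ++ acc) := by
            simp [hseen, hni, ho]
          simp only [pvScan, if_neg hc, ite_false, ho]
          rw [List.append_assoc]
          exact ih (acc ++ [item]) inc hrest
      · by_cases hcc : c ∈ al
        · have hg : pvGood d al seen item = true := by simp [pvGood, pvOk, hget, hseen, hcc]
          have hin : item ∈ I := hmem item (List.mem_cons_self) hg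
          have hc : item ∈ seen ∨ item ∈ I ++ acc := Or.inr (by simp [hin])
          simp only [pvScan, if_pos hc, pvB_loop, if_neg hseen, hget, if_pos hcc]
          exact ih acc (inc ++ [item]) hrest
        · have hok : pvOk d al item = false := by simp [pvOk, hget, hcc]
          have hni : item ∉ I := hI item hok
          simp only [pvB_loop, if_neg hseen, hget, if_neg hcc]
          by_cases ho : item ∈ acc
          · have hc : item ∈ seen ∨ item ∈ I ++ acc := Or.inr (by simp [ho])
            simp only [pvScan, if_pos hc, ite_true, ho]
            exact ih acc inc hrest
          · have hc : ¬ (item ∈ seen ∨ item ∈ I ++ acc) := by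
              simp [hseen, hni, ho]
            simp only [pvScan, if_neg hc, ite_false, ho]
            rw [List.append_assoc]
            exact ih (acc ++ [item]) inc hrest

-- with k ≤ 0 the first loop of A stops at the first unseen item: at most one element
theorem pvA_first_short (d : List (Int × Int)) (al seen : List Int) (k : Int) (hk : k ≤ 0) :
    ∀ l : List Int, (pvA_first d al seen k l []).length ≤ 1 := by
  intro l
  induction l with
  | nil => simp [pvA_first]
  | cons item rest ih =>
    by_cases hseen : item ∈ seen
    · simpa [pvA_first, hseen] using ih
    · rcases hget : (PySem.Dict.mk d).get? item with _ | c
      · simp [pvA_first, hseen, hget, show k ≤ (0 : Int) from hk]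
      · by_cases hc : c ∈ al
        · simp [pvA_first, hseen, hget, hc, show k ≤ (1 : Int) by omega]
        · simp [pvA_first, hseen, hget, hc, show k ≤ (0 : Int) from hk]

-- ===== VERDICT (by name: the statement is the Claim_ definition above) =====
theorem popularity_rec_py_spec : Claim_equal_popularity_rec_py := by
  intro pop d al seen k _
  unfold Spec_popularity_rec_py
  simp only [popularity_rec_py, popularity_rec_py_alt]
  by_cases hk : k ≤ 0
  · -- B returns []; A's result has length ≤ 1 and the slice [:k] with k ≤ 0 empties it
    rw [if_pos hk]
    set recs1 := pvA_first d al seen k pop [] with hr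
    have hlen : recs1.length ≤ 1 := pvA_first_short d al seen k hk pop
    have hnot : ¬ ((recs1.length : Int) < k) := by omega
    rw [if_neg hnot]
    rcases eq_or_lt_of_le hk with hk0 | hkneg
    · subst hk0
      rw [PySem.List.slice_to recs1 (le_refl 0)]
      simp
    · have hm : 0 < (-k).toNat := by omega
      have hkm : k = -(((-k).toNat : Nat) : Int) := by omega
      rw [hkm, PySem.List.slice_to_neg_natCast recs1 ((-k).toNat) hm]
      have h0 : recs1.length - (-k).toNat = 0 := by omega
      rw [h0, List.take_zero]
  · rw [if_neg hk]
    have hk' : 0 < k := by omega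
    have hkt : (k.toNat : Int) = k := by omega
    have hB1 : (pvB_loop d al seen pop [] []).1 = pvF d al seen pop := by
      simpa using pvB_fst d al seen pop [] []
    set I := pvF d al seen pop with hIdef
    set O := (pvB_loop d al seen pop [] []).2 with hOdef
    have hA1 : pvA_first d al seen k pop [] = I.take k.toNat := by
      simpa using pvA_first_eq d al seen k pop [] (by simp; omega)
    rw [hA1, PySem.List.slice_to _ (by omega : (0:Int) ≤ k),
        PySem.List.slice_to _ (by omega : (0:Int) ≤ k), hB1]
    by_cases hlen : ((I.take k.toNat).length : Int) < k
    · -- first pass exhausted the in-category items: recs1 = I, second pass runs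
      have hIlen : I.length < k.toNat := by
        simp [List.length_take] at hlen; omega
      have htake : I.take k.toNat = I := List.take_of_length_le (by omega)
      rw [if_pos hlen, htake]
      have hsec : pvA_second seen k pop I = (pvScan seen pop I).take k.toNat :=
        pvA_second_eq seen k pop I (by omega)
      have hbridge : pvScan seen pop I = I ++ O := by
        have := pvScan_eq_pvB d al seen I
          (fun x hx => pvF_mem_ok hx) pop [] []
          (fun x hx hg => List.mem_filter.mpr ⟨hx, hg⟩)
        simpa using this
      rw [hsec, hbridge, List.take_take, min_self]
    · -- first pass already produced k items
      rw [if_neg hlen]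
      have hKI : k.toNat ≤ I.length := by
        simp [List.length_take] at hlen ⊢; omega
      rw [List.take_take, min_self, List.take_append_of_le_length hKI]
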